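-- pv_equiv track=rewrite | github.com/Dzilne/TIDA | konsolowa/kostki.py | policz_punkty
-- ===== SOURCE A (Python) =====
-- def policz_punkty(wyniki):
--     licznik = {}
--     suma = 0
--
--     for wynik in wyniki:
--         if wynik in licznik:
--             licznik[wynik] += 1
--         else:
--             licznik[wynik] = 1
--
--     for liczba, ilosc in licznik.items():
--         if ilosc >= 2:
--             suma += liczba * ilosc
--
--     return suma
-- ===== SOURCE B (Python) =====
-- def policz_punkty(wyniki):
--     seen = set()
--     repeated = set()
--     suma = 0
--     for x in wyniki:
--         if x in repeated:
--             suma += x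
--         elif x in seen:
--             repeated.add(x)
--             suma += 2 * x
--         else:
--             seen.add(x)
--     return suma
-- ===== Notes on version B (the rewrite author's own statement) =====
-- stated objective: alternative
-- what changed: Replaces A's two-phase dict-count-then-iterate-items with a single pass that keeps two sets (seen once / seen at least twice) and adds each element's weighted contribution (2x on the second occurrence, x on each later one) the moment it is read, storing no counts at all.
import Mathlib
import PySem

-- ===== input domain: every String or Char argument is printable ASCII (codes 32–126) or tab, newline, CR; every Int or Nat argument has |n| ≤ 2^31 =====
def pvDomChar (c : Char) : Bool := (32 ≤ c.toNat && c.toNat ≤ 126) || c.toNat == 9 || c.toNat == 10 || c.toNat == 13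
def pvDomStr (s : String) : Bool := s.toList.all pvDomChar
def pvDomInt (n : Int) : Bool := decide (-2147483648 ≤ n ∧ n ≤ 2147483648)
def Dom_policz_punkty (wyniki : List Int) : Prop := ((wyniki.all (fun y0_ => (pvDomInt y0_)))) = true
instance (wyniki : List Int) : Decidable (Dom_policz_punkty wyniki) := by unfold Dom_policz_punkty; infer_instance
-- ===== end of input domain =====

-- B replaces A's dict-count-then-iterate-items strategy with a single pass keeping two sets
-- (seen once / seen twice or more) and adding each element's weighted contribution as it is read;
-- an alternative algorithm of the same cost, storing no counts.

-- ===== PORT A =====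
def policz_punkty (wyniki : List Int) : Int :=
  (wyniki.foldl
    (fun d wynik =>
      if d.contains wynik then d.insert wynik (d.getD wynik 0 + 1)
      else d.insert wynik 1)
    (PySem.Dict.empty : PySem.Dict Int Int)).items.foldl
    (fun suma p => if p.2 ≥ 2 then suma + p.1 * p.2 else suma) 0

-- ===== PORT B =====
def policz_punkty_alt (wyniki : List Int) : Int :=
  (wyniki.foldl
    (fun st x =>
      if PySem.Set.contains st.2.1 x then (st.1, st.2.1, st.2.2 + x)
      else if PySem.Set.contains st.1 x then (st.1, PySem.Set.add st.2.1 x, st.2.2 + 2 * x)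
      else (PySem.Set.add st.1 x, st.2.1, st.2.2))
    (([] : PySem.Set Int), ([] : PySem.Set Int), (0 : Int))).2.2

-- ===== PRECONDITION & SPEC =====
def Spec_policz_punkty (wyniki : List Int) (out : Int) : Prop := out = policz_punkty_alt wyniki
instance (wyniki : List Int) (out : Int) : Decidable (Spec_policz_punkty wyniki out) := by unfold Spec_policz_punkty; infer_instance

-- ===== CLAIM (what is proved, stated in full; the proofs are below) =====
def Claim_equal_policz_punkty : Prop := ∀ (wyniki : List Int), Dom_policz_punkty wyniki → Spec_policz_punkty wyniki (policz_punkty wyniki)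

-- ===== LEMMAS AND PROOFS =====

-- A's first loop is exactly collections.Counter.
theorem pv_counter_fold (l : List Int) :
    l.foldl
      (fun d wynik =>
        if d.contains wynik then d.insert wynik (d.getD wynik 0 + 1)
        else d.insert wynik 1)
      (PySem.Dict.empty : PySem.Dict Int Int) = PySem.Dict.counter l := by
  rw [← PySem.Dict.foldl_insert_getD_add_one_eq_counter]
  congr 1
  funext d w
  by_cases h : d.contains w
  · simp [h]
  · simp only [h, Bool.false_eq_true, if_false]
    rw [PySem.Dict.getD_of_not_contains d 0 (by simpa using h)]
    norm_num

-- Both programs equal the same Finset sum over the distinct values.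
theorem pv_A_group (l : List Int) :
    policz_punkty l = ∑ x ∈ l.toFinset, (if 2 ≤ l.count x then (l.count x : Int) * x else 0) := by
  unfold policz_punkty
  rw [pv_counter_fold, PySem.Dict.items_counter, List.foldl_map]
  have hstep :
      (fun (suma : Int) (k : Int) =>
        if ((k, (l.count k : Int)) : Int × Int).2 ≥ 2 then suma + ((k, (l.count k : Int)) : Int × Int).1 * ((k, (l.count k : Int)) : Int × Int).2 else suma)
      = fun suma k => suma + (if 2 ≤ l.count k then (l.count k : Int) * k else 0) := by
    funext suma k
    by_cases h : (2 : Int) ≤ (l.count k : Int)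
    · have h' : 2 ≤ l.count k := by exact_mod_cast h
      simp [ge_iff_le, h, h', mul_comm]
    · have h' : ¬ 2 ≤ l.count k := by exact_mod_cast h
      simp [ge_iff_le, h, h']
  rw [hstep, PySem.List.foldl_add, zero_add,
      ← List.sum_toFinset _ (PySem.Set.nodup_ofList l)]
  apply Finset.sum_congr _ (fun _ _ => rfl)
  ext x
  simp [PySem.Set.mem_ofList]

-- B's loop step and fold, named for the proofs (identical to the lambda in policz_punkty_alt)
def pvStep (st : PySem.Set Int × PySem.Set Int × Int) (x : Int) :
    PySem.Set Int × PySem.Set Int × Int :=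
  if PySem.Set.contains st.2.1 x then (st.1, st.2.1, st.2.2 + x)
  else if PySem.Set.contains st.1 x then (st.1, PySem.Set.add st.2.1 x, st.2.2 + 2 * x)
  else (PySem.Set.add st.1 x, st.2.1, st.2.2)

def pvFold (l : List Int) : PySem.Set Int × PySem.Set Int × Int :=
  l.foldl pvStep (([] : PySem.Set Int), ([] : PySem.Set Int), (0 : Int))

theorem pvFold_append_singleton (p : List Int) (x : Int) :
    pvFold (p ++ [x]) = pvStep (pvFold p) x := by
  simp [pvFold, List.foldl_append]

-- the grouped sum both programs compute
def pvG (p : List Int) : Int :=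
  ∑ x ∈ p.toFinset, (if 2 ≤ p.count x then (p.count x : Int) * x else 0)

-- appending one element changes the grouped sum by x, 2x or 0 according to its previous count
theorem pvG_append_singleton (p : List Int) (x : Int) :
    pvG (p ++ [x]) = pvG p +
      (if 2 ≤ p.count x then x else if p.count x = 1 then 2 * x else 0) := by
  have htf : (p ++ [x]).toFinset = insert x p.toFinset := by
    ext y; simp
  have hcount : ∀ y, (p ++ [x]).count y = p.count y + (if y = x then 1 else 0) := by
    intro y
    rw [List.count_append]
    by_cases h : y = x
    · subst h; simp
    · have h0 : List.count y [x] = 0 := by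
        rw [List.count_eq_zero]; simpa using h
      rw [h0]; simp [h]
  have hmemx : x ∈ insert x p.toFinset := Finset.mem_insert_self x p.toFinset
  have herase : (insert x p.toFinset).erase x = p.toFinset.erase x :=
    Finset.erase_insert_eq_erase _ _
  -- split off the x-term on the left
  have hL : pvG (p ++ [x]) =
      (if 2 ≤ p.count x + 1 then ((p.count x : Int) + 1) * x else 0) +
      ∑ y ∈ p.toFinset.erase x, (if 2 ≤ p.count y then (p.count y : Int) * y else 0) := by
    unfold pvG
    rw [htf, ← Finset.add_sum_erase _ _ hmemx, herase]
    congr 1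
    · rw [hcount x]; simp
    · refine Finset.sum_congr rfl (fun y hy => ?_)
      have hyx : y ≠ x := Finset.ne_of_mem_erase hy
      rw [hcount y]
      simp [hyx]
  by_cases hx : x ∈ p
  · have hxs : x ∈ p.toFinset := List.mem_toFinset.mpr hx
    have hR : pvG p =
        (if 2 ≤ p.count x then (p.count x : Int) * x else 0) +
        ∑ y ∈ p.toFinset.erase x, (if 2 ≤ p.count y then (p.count y : Int) * y else 0) := by
      unfold pvG
      rw [← Finset.add_sum_erase _ _ hxs]
    rw [hL, hR]
    have hc1 : 1 ≤ p.count x := List.one_le_count_iff.mpr hx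
    by_cases h2 : 2 ≤ p.count x
    · have h2' : 2 ≤ p.count x + 1 := by omega
      simp only [if_pos h2, if_pos h2']
      ring
    · have hc : p.count x = 1 := by omega
      simp only [hc]
      norm_num
      ring
  · have hc0 : p.count x = 0 := List.count_eq_zero.mpr hx
    have hxs : x ∉ p.toFinset := fun h => hx (List.mem_toFinset.mp h)
    have herase2 : p.toFinset.erase x = p.toFinset := Finset.erase_eq_of_notMem hxs
    rw [hL, herase2, hc0]
    norm_num
    rfl

-- B's loop state after any prefix: seen/repeated memberships and the running sum
theorem pv_B_inv (l : List Int) :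
    (∀ y, y ∈ (pvFold l).1 ↔ y ∈ l) ∧
    (∀ y, y ∈ (pvFold l).2.1 ↔ 2 ≤ l.count y) ∧
    (pvFold l).2.2 = pvG l := by
  induction l using List.reverseRecOn with
  | nil => refine ⟨by simp [pvFold], by simp [pvFold], ?_⟩; simp [pvFold, pvG]
  | append_singleton p x ih =>
    obtain ⟨hseen, hrep, hsum⟩ := ih
    rw [pvFold_append_singleton]
    have hcount : ∀ y, (p ++ [x]).count y = p.count y + (if y = x then 1 else 0) := by
      intro y
      rw [List.count_append]
      by_cases h : y = x
      · subst h; simp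
      · have h0 : List.count y [x] = 0 := by
          rw [List.count_eq_zero]; simpa using h
        rw [h0]; simp [h]
    by_cases h2 : 2 ≤ p.count x
    · have hcrep : PySem.Set.contains (pvFold p).2.1 x = true :=
        (PySem.Set.contains_iff _ _).mpr ((hrep x).mpr h2)
      refine ⟨?_, ?_, ?_⟩ <;> simp only [pvStep, hcrep, if_pos]
      · intro y
        rw [hseen y]
        constructor
        · intro h; exact List.mem_append_left _ h
        · intro h
          rcases List.mem_append.mp h with h | h
          · exact h
          · have : y = x := by simpa using h
            subst this
            exact List.count_pos_iff.mp (by omega)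
      · intro y
        rw [hrep y, hcount y]
        by_cases hyx : y = x
        · subst hyx; omega
        · simp [hyx]
      · rw [hsum, pvG_append_singleton, if_pos h2]
    · have hcrep : PySem.Set.contains (pvFold p).2.1 x = false := by
        rw [← Bool.not_eq_true, PySem.Set.contains_iff, hrep x]; omega
      by_cases h1 : x ∈ p
      · have hc1 : p.count x = 1 := by
          have := List.one_le_count_iff.mpr h1; omega
        have hcseen : PySem.Set.contains (pvFold p).1 x = true :=
          (PySem.Set.contains_iff _ _).mpr ((hseen x).mpr h1)
        refine ⟨?_, ?_, ?_⟩ <;>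
          simp only [pvStep, hcrep, Bool.false_eq_true, if_false, hcseen, if_pos]
        · intro y
          rw [hseen y]
          constructor
          · intro h; exact List.mem_append_left _ h
          · intro h
            rcases List.mem_append.mp h with h | h
            · exact h
            · have : y = x := by simpa using h
              subst this; exact h1
        · intro y
          rw [PySem.Set.mem_add, hrep y, hcount y]
          by_cases hyx : y = x
          · subst hyx; simp [hc1]
          · simp [hyx]
        · rw [hsum, pvG_append_singleton, if_neg h2, if_pos hc1]
      · have hc0 : p.count x = 0 := List.count_eq_zero.mpr h1
        have hcseen : PySem.Set.contains (pvFold p).1 x = false := by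
          rw [← Bool.not_eq_true, PySem.Set.contains_iff, hseen x]
          exact h1
        refine ⟨?_, ?_, ?_⟩ <;>
          simp only [pvStep, hcrep, hcseen, Bool.false_eq_true, if_false]
        · intro y
          rw [PySem.Set.mem_add, hseen y]
          simp [or_comm]
        · intro y
          rw [hrep y, hcount y]
          by_cases hyx : y = x
          · subst hyx; simp [hc0]
          · simp [hyx]
        · rw [hsum, pvG_append_singleton, if_neg h2, if_neg (by omega), add_zero]

theorem pv_B_group (l : List Int) :
    policz_punkty_alt l = ∑ x ∈ l.toFinset, (if 2 ≤ l.count x then (l.count x : Int) * x else 0) := by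
  have h : policz_punkty_alt l = (pvFold l).2.2 := rfl
  rw [h, (pv_B_inv l).2.2]
  rfl

-- ===== VERDICT (by name: the statement is the Claim_ definition above) =====
theorem policz_punkty_spec : Claim_equal_policz_punkty := by
  intro wyniki _
  unfold Spec_policz_punkty
  rw [pv_A_group, pv_B_group]
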